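-- pv_equiv track=rewrite | github.com/WilliamLinxw/Pianobot | midi_parse.py | get_black_key_hand_group
-- ===== SOURCE A (Python) =====
-- def get_black_key_hand_group(black_key_group):
--     hand_pos = []
--     black_key_hand_group = []
--     hand_pos.append(black_key_group[0])
--     i = 0
--     while True:
--         if i == len(black_key_group) - 1:
--             black_key_hand_group.append(hand_pos)
--             break
--         elif black_key_group[i+1] - black_key_group[i] < 3:
--             hand_pos.append(black_key_group[i+1])
--         else:
--             black_key_hand_group.append(hand_pos)
--             hand_pos = []
--             hand_pos.append(black_key_group[i+1])
--         i += 1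
--     return black_key_hand_group
-- ===== SOURCE B (Python) =====
-- def get_black_key_hand_group(black_key_group):
--     n = len(black_key_group)
--     cuts = [i + 1 for i in range(n - 1)
--             if black_key_group[i + 1] - black_key_group[i] >= 3]
--     bounds = [0] + cuts + [n]
--     return [black_key_group[lo:hi] for lo, hi in zip(bounds, bounds[1:])]
-- ===== Notes on version B (the rewrite author's own statement) =====
-- stated objective: alternative
-- what changed: B replaces A's single stateful while-loop (mutating a current hand and appending on break) by a two-phase decomposition: one comprehension collects cut indices where the gap is >= 3, then the result is built by slicing between consecutive boundaries.
-- outside the precondition, e.g. on get_black_key_hand_group([]): A raises IndexError, B returns [[]]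
import Mathlib
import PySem

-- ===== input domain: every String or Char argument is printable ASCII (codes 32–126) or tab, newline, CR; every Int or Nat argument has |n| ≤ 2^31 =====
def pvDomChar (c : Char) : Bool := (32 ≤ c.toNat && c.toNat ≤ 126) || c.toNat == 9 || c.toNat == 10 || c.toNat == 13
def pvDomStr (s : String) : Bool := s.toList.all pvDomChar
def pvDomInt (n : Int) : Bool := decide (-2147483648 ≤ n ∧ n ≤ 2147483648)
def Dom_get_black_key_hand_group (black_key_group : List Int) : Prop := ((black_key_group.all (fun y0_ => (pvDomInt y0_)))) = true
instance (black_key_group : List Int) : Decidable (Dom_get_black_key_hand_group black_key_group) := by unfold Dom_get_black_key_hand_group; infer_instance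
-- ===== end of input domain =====

-- B rebuilds the grouping from a cut-index table and boundary slices instead of A's stateful while-loop; same cost, different decomposition.

-- ===== PORT A =====
-- A's `while True` loop over index i; fuel (= length, enough under Pre_) only makes the
-- recursion total. On Pre_-admitted inputs every index access is in range, so getD is exact.
def pvGoA (g : List Int) : Nat → Nat → List Int → List (List Int) → List (List Int)
  | 0, _, _, acc => acc
  | fuel+1, i, hand, acc =>
      if i = g.length - 1 then acc ++ [hand]
      else if g.getD (i+1) 0 - g.getD i 0 < 3 then
        pvGoA g fuel (i+1) (hand ++ [g.getD (i+1) 0]) acc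
      else
        pvGoA g fuel (i+1) [g.getD (i+1) 0] (acc ++ [hand])

def get_black_key_hand_group (black_key_group : List Int) : List (List Int) :=
  pvGoA black_key_group black_key_group.length 0 [black_key_group.getD 0 0] []

-- ===== PORT B =====
-- cut indices: [i+1 for i in range(n-1) if g[i+1]-g[i] >= 3]
def pvCuts (g : List Int) : List Nat :=
  (((List.range (g.length - 1)).filter
      (fun i => decide (3 ≤ g.getD (i+1) 0 - g.getD i 0))).map (· + 1))

-- the slice comprehension [g[lo:hi] for lo, hi in zip(bounds, bounds[1:])];
-- drop/take is exact for Python's g[lo:hi] with nonnegative lo ≤ hi boundaries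
def pvSlices (g : List Int) (bounds : List Nat) : List (List Int) :=
  (bounds.zip bounds.tail).map (fun p => ((g.drop p.1).take (p.2 - p.1)))

def get_black_key_hand_group_alt (black_key_group : List Int) : List (List Int) :=
  pvSlices black_key_group (0 :: (pvCuts black_key_group ++ [black_key_group.length]))

-- ===== PRECONDITION & SPEC =====
-- Pre_ excludes only the empty list, on which Python A raises IndexError at its initial element access.
def Pre_get_black_key_hand_group (black_key_group : List Int) : Prop := black_key_group ≠ []
instance (black_key_group : List Int) : Decidable (Pre_get_black_key_hand_group black_key_group) := by unfold Pre_get_black_key_hand_group; infer_instance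
def pvWitness_get_black_key_hand_group : List Int := [60, 61, 66]

def Spec_get_black_key_hand_group (black_key_group : List Int) (out : List (List Int)) : Prop := out = get_black_key_hand_group_alt black_key_group
instance (black_key_group : List Int) (out : List (List Int)) : Decidable (Spec_get_black_key_hand_group black_key_group out) := by unfold Spec_get_black_key_hand_group; infer_instance

-- ===== CLAIM (what is proved, stated in full; the proofs are below) =====
def Claim_equal_get_black_key_hand_group : Prop := ∀ (black_key_group : List Int), Dom_get_black_key_hand_group black_key_group → Pre_get_black_key_hand_group black_key_group → Spec_get_black_key_hand_group black_key_group (get_black_key_hand_group black_key_group)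

-- ===== LEMMAS AND PROOFS =====

-- common recursive characterisation: current hand `hand` (ending in `cur`), remaining keys `rest`
def pvGrp : List Int → Int → List Int → List (List Int)
  | hand, _, [] => [hand]
  | hand, cur, y :: ys =>
      if y - cur < 3 then pvGrp (hand ++ [y]) y ys else hand :: pvGrp [y] y ys

theorem pvGrp_append (rest : List Int) (h h' : List Int) (cur : Int) :
    pvGrp (h ++ h') cur rest = (pvGrp h' cur rest).modifyHead (h ++ ·) := by
  induction rest generalizing h' cur with
  | nil => simp [pvGrp]
  | cons y ys ih =>
      by_cases hc : y - cur < 3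
      · simpa [pvGrp, hc, List.append_assoc] using ih (h' ++ [y]) y
      · simp [pvGrp, hc]

theorem pvSlices_cons (g : List Int) (a b : Nat) (bs : List Nat) :
    pvSlices g (a :: b :: bs) = ((g.drop a).take (b - a)) :: pvSlices g (b :: bs) := by
  simp [pvSlices]

theorem pvSlices_shift (x : Int) (g : List Int) (bs : List Nat) :
    pvSlices (x :: g) (bs.map (· + 1)) = pvSlices g bs := by
  induction bs with
  | nil => rfl
  | cons a bs ih =>
      cases bs with
      | nil => rfl
      | cons b bs' =>
          rw [List.map_cons, List.map_cons, pvSlices_cons, pvSlices_cons,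
            show ((b:Nat)+1) :: bs'.map (· + 1) = (b :: bs').map (· + 1) from rfl, ih]
          congr 1
          simp [Nat.add_sub_add_right]

theorem pvCuts_cons (x y : Int) (ys : List Int) :
    pvCuts (x :: y :: ys) =
      (if 3 ≤ y - x then [1] else []) ++ (pvCuts (y :: ys)).map (· + 1) := by
  have hr : List.range ((y :: ys).length) = 0 :: (List.range ((y :: ys).length - 1)).map Nat.succ := by
    simp [List.range_succ_eq_map]
  simp only [pvCuts, List.length_cons, Nat.add_sub_cancel]
  rw [show (ys.length + 1) = (y :: ys).length from by simp, hr]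
  by_cases hc : (3:Int) ≤ y - x
  · simp only [List.filter_cons, List.filter_map, Function.comp_def, List.map_map]
    simp [hc]
  · simp only [List.filter_cons, List.filter_map, Function.comp_def, List.map_map]
    simp [hc]

theorem pvSlices_eq_grp (xs : List Int) (x : Int) :
    pvSlices (x :: xs) (0 :: (pvCuts (x :: xs) ++ [(x :: xs).length])) = pvGrp [x] x xs := by
  induction xs generalizing x with
  | nil => simp [pvSlices, pvCuts, pvGrp]
  | cons y ys ih =>
      rw [pvCuts_cons]
      by_cases hc : (3:Int) ≤ y - x
      · rw [if_pos hc]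
        have hb : (0:Nat) :: ([1] ++ (pvCuts (y :: ys)).map (· + 1) ++ [(x :: y :: ys).length])
            = 0 :: 1 :: ((pvCuts (y :: ys) ++ [(y :: ys).length]).map (· + 1)) := by
          simp [List.map_append]
        rw [hb, pvSlices_cons,
          show ((1:Nat) :: (pvCuts (y :: ys) ++ [(y :: ys).length]).map (· + 1))
            = ((0 :: (pvCuts (y :: ys) ++ [(y :: ys).length])).map (· + 1)) from by simp,
          pvSlices_shift, ih y]
        have hnc : ¬ (y - x < 3) := by omega
        simp [pvGrp, hnc]
      · rw [if_neg hc]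
        have hb : ([] : List Nat) ++ (pvCuts (y :: ys)).map (· + 1) ++ [(x :: y :: ys).length]
            = (pvCuts (y :: ys) ++ [(y :: ys).length]).map (· + 1) := by
          simp [List.map_append]
        rw [hb]
        obtain ⟨b, bs', hbs⟩ : ∃ b bs', pvCuts (y :: ys) ++ [(y :: ys).length] = b :: bs' := by
          cases h : pvCuts (y :: ys) ++ [(y :: ys).length] with
          | nil => simp at h
          | cons b bs' => exact ⟨b, bs', rfl⟩
        rw [hbs]
        have hnocut : pvSlices (x :: y :: ys) ((0:Nat) :: (b :: bs').map (· + 1))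
            = (pvSlices (y :: ys) (0 :: b :: bs')).modifyHead (x :: ·) := by
          rw [List.map_cons, pvSlices_cons, pvSlices_cons]
          have hsh := pvSlices_shift x (y :: ys) (b :: bs')
          simp only [List.map_cons] at hsh
          rw [hsh]
          simp
        rw [hnocut, ← hbs, ih y]
        have hlt : y - x < 3 := by omega
        rw [show pvGrp [x] x (y :: ys) = pvGrp ([x] ++ [y]) y ys from by simp [pvGrp, hlt],
          pvGrp_append]
        simp

theorem pvGoA_eq_grp (g : List Int) (rest : List Int) :
    ∀ (fuel i : Nat) (cur : Int) (hand : List Int) (acc : List (List Int)),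
      g.drop i = cur :: rest → rest.length + 1 ≤ fuel →
      pvGoA g fuel i hand acc = acc ++ pvGrp hand cur rest := by
  induction rest with
  | nil =>
      intro fuel i cur hand acc hdrop hfuel
      obtain ⟨f, rfl⟩ : ∃ f, fuel = f + 1 := ⟨fuel - 1, by omega⟩
      have hlen : g.length = i + 1 := by
        have := congrArg List.length hdrop
        simp at this; omega
      simp [pvGoA, hlen, pvGrp]
  | cons y ys ih =>
      intro fuel i cur hand acc hdrop hfuel
      obtain ⟨f, rfl⟩ : ∃ f, fuel = f + 1 := ⟨fuel - 1, by omega⟩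
      have hlen : g.length = i + (ys.length + 2) := by
        have := congrArg List.length hdrop
        simp at this; omega
      have hne : ¬ (i = g.length - 1) := by omega
      have hgi : g.getD i 0 = cur := by
        have h0 : (List.drop i g)[0]? = g[i + 0]? := List.getElem?_drop
        rw [hdrop] at h0
        have : g[i]? = some cur := by simpa using h0.symm
        simp [List.getD, this]
      have hgi1 : g.getD (i+1) 0 = y := by
        have h0 : (List.drop i g)[1]? = g[i + 1]? := List.getElem?_drop
        rw [hdrop] at h0
        have : g[i+1]? = some y := by simpa using h0.symm
        simp [List.getD, this]
      have hdrop1 : g.drop (i+1) = y :: ys := by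
        have h1 : (g.drop i).drop 1 = g.drop (i+1) := by rw [List.drop_drop]
        rw [← h1, hdrop]; rfl
      rw [show pvGoA g (f+1) i hand acc
          = if i = g.length - 1 then acc ++ [hand]
            else if g.getD (i+1) 0 - g.getD i 0 < 3 then
              pvGoA g f (i+1) (hand ++ [g.getD (i+1) 0]) acc
            else pvGoA g f (i+1) [g.getD (i+1) 0] (acc ++ [hand]) from rfl]
      rw [if_neg hne, hgi, hgi1]
      by_cases hc : y - cur < 3
      · rw [if_pos hc, ih f (i+1) y (hand ++ [y]) acc hdrop1 (by simpa using hfuel)]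
        simp [pvGrp, hc]
      · rw [if_neg hc, ih f (i+1) y [y] (acc ++ [hand]) hdrop1 (by simpa using hfuel)]
        simp [pvGrp, hc]

-- ===== VERDICT (by name: the statement is the Claim_ definition above) =====
theorem get_black_key_hand_group_spec : Claim_equal_get_black_key_hand_group := by
  intro g _ hpre
  unfold Spec_get_black_key_hand_group
  cases g with
  | nil => exact absurd rfl hpre
  | cons x xs =>
      unfold get_black_key_hand_group get_black_key_hand_group_alt
      rw [pvGoA_eq_grp (x :: xs) xs (x :: xs).length 0 x [(x :: xs).getD 0 0] []
            (by simp) (by simp)]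
      simp only [List.getD, List.getElem?_cons_zero, Option.getD_some, List.nil_append]
      exact (pvSlices_eq_grp xs x).symm
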